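-- pv_equiv track=rewrite | github.com/MorozVladislav/Python-Studying | solutions/task_6.py | get_inf_seq_element_1
-- ===== SOURCE A (Python) =====
-- def get_inf_seq_element_1(index):
--     counter, number_of_same_values, counter_of_same_values = 0, 0, 0
--     value = 1
--     while counter < index:
--         if counter_of_same_values < number_of_same_values:
--             counter_of_same_values += 1
--         else:
--             value = value ^ 1
--             counter_of_same_values = 0
--             number_of_same_values += 1
--         counter += 1
--     return value
-- ===== SOURCE B (Python) =====
-- def get_inf_seq_element_1(index):
--     # The value flips at each triangular number, so find the largest k whose
--     # triangular number is at most index by binary search and return the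
--     # parity-flipped bit.
--     if index <= 0:
--         return 1
--     lo, hi = 0, index
--     while lo < hi:
--         mid = (lo + hi + 1) // 2
--         if mid * (mid + 1) // 2 <= index:
--             lo = mid
--         else:
--             hi = mid - 1
--     return 1 ^ (lo % 2)
-- ===== Notes on version B (the rewrite author's own statement) =====
-- stated objective: faster
-- what changed: Replaced the O(index) step-by-step block simulation with an O(log index) binary search for the largest k whose triangular number does not exceed index, returning the parity-flipped bit.
import Mathlib
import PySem

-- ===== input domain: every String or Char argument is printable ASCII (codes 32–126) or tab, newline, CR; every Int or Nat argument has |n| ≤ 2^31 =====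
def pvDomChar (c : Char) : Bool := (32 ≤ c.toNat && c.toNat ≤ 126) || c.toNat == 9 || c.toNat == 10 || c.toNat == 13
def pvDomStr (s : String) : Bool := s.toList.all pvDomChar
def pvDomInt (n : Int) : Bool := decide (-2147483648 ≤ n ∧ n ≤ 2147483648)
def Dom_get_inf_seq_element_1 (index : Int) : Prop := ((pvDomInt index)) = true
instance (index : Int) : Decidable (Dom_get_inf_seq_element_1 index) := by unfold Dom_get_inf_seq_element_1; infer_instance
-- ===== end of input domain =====

-- B replaces A's O(index) step-by-step block simulation by an O(log index)
-- binary search for the largest k whose triangular number is at most index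
-- (objective: faster).

-- ===== PORT A =====
-- A's while loop; it runs exactly max(index,0) times (counter goes 0..index),
-- so the remaining iteration count (index - counter).toNat is the fuel.
-- State: (number_of_same_values, counter_of_same_values, value).
def pvLoopA (fuel : Nat) (n c value : Int) : Int :=
  match fuel with
  | 0 => value
  | f + 1 =>
    if c < n then pvLoopA f n (c + 1) value
    else pvLoopA f (n + 1) 0 (PySem.Int.bxor value 1)

def get_inf_seq_element_1 (index : Int) : Int := pvLoopA index.toNat 0 0 1

-- ===== PORT B =====
-- B's binary-search loop over (lo, hi); hi - lo shrinks by at least 1 per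
-- iteration, so the initial gap index - 0 bounds the iterations (fuel).
def pvLoopB (fuel : Nat) (index lo hi : Int) : Int :=
  match fuel with
  | 0 => lo
  | f + 1 =>
    if lo < hi then
      let mid := PySem.Int.floordiv (lo + hi + 1) 2
      if PySem.Int.floordiv (mid * (mid + 1)) 2 ≤ index then pvLoopB f index mid hi
      else pvLoopB f index lo (mid - 1)
    else lo

def get_inf_seq_element_1_alt (index : Int) : Int :=
  if index ≤ 0 then 1
  else PySem.Int.bxor 1 (PySem.Int.mod (pvLoopB index.toNat index 0 index) 2)

-- ===== PRECONDITION & SPEC =====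
def Spec_get_inf_seq_element_1 (index : Int) (out : Int) : Prop := out = get_inf_seq_element_1_alt index
instance (index : Int) (out : Int) : Decidable (Spec_get_inf_seq_element_1 index out) := by unfold Spec_get_inf_seq_element_1; infer_instance

-- ===== CLAIM (what is proved, stated in full; the proofs are below) =====
def Claim_equal_get_inf_seq_element_1 : Prop := ∀ (index : Int), Dom_get_inf_seq_element_1 index → Spec_get_inf_seq_element_1 index (get_inf_seq_element_1 index)

-- ===== LEMMAS AND PROOFS =====

-- tri n = n*(n+1) // 2, the triangular numbers (matches B's floordiv exactly)
def pvTri (n : Int) : Int := PySem.Int.floordiv (n * (n + 1)) 2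

theorem pvTri_two_mul (n : Int) : 2 * pvTri n = n * (n + 1) := by
  obtain ⟨k, hk⟩ := Int.even_mul_succ_self n
  unfold pvTri
  rw [PySem.Int.floordiv_eq_ediv_of_pos (by omega)]
  omega

theorem pvTri_succ (n : Int) : pvTri (n + 1) = pvTri n + n + 1 := by
  have h1 := pvTri_two_mul n
  have h2 := pvTri_two_mul (n + 1)
  nlinarith

theorem pvTri_mono {a b : Int} (ha : 0 ≤ a) (hab : a ≤ b) : pvTri a ≤ pvTri b := by
  have h1 := pvTri_two_mul a
  have h2 := pvTri_two_mul b
  nlinarith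

-- uniqueness of the bracket position
theorem pvTri_unique {a b index : Int} (ha : 0 ≤ a) (hb : 0 ≤ b)
    (h1 : pvTri a ≤ index) (h2 : index < pvTri (a + 1))
    (h3 : pvTri b ≤ index) (h4 : index < pvTri (b + 1)) : a = b := by
  by_contra hne
  rcases lt_or_gt_of_ne hne with h | h
  · have := pvTri_mono (by omega : (0:Int) ≤ a + 1) (by omega : a + 1 ≤ b); omega
  · have := pvTri_mono (by omega : (0:Int) ≤ b + 1) (by omega : b + 1 ≤ a); omega

-- existence of the bracket position for nonnegative index
theorem pvTri_exists (index : Int) (h : 0 ≤ index) :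
    ∃ N, 0 ≤ N ∧ pvTri N ≤ index ∧ index < pvTri (N + 1) := by
  induction index, h using Int.le_induction with
  | base => exact ⟨0, by decide, by decide, by decide⟩
  | succ m hm ih =>
    obtain ⟨N, hN0, hN1, hN2⟩ := ih
    by_cases hc : pvTri (N + 1) ≤ m + 1
    · refine ⟨N + 1, by omega, hc, ?_⟩
      have := pvTri_succ (N + 1)
      omega
    · exact ⟨N, hN0, by omega, by omega⟩

-- A's loop invariant: counter = tri n + c with 0 ≤ c ≤ n, value = parity of n
theorem pvLoopA_eq (index : Int) (N : Int) (hN0 : 0 ≤ N)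
    (hN1 : pvTri N ≤ index) (hN2 : index < pvTri (N + 1)) :
    ∀ (fuel : Nat) (counter n c : Int), (index - counter).toNat = fuel →
    0 ≤ c → c ≤ n → counter = pvTri n + c → counter ≤ index →
    pvLoopA fuel n c (if n % 2 = 0 then 1 else 0) =
      (if N % 2 = 0 then 1 else 0) := by
  intro fuel
  induction fuel with
  | zero =>
    intro counter n c hf hc0 hcn hinv hle
    show (if n % 2 = 0 then (1:Int) else 0) = (if N % 2 = 0 then 1 else 0)
    have hn0 : 0 ≤ n := by omega
    have h1 : pvTri n ≤ index := by omega
    have h2 : index < pvTri (n + 1) := by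
      have := pvTri_succ n; omega
    rw [pvTri_unique hn0 hN0 h1 h2 hN1 hN2]
  | succ fuel ih =>
    intro counter n c hf hc0 hcn hinv hle
    have hlt : counter < index := by omega
    show (if c < n then pvLoopA fuel n (c + 1) (if n % 2 = 0 then (1:Int) else 0)
          else pvLoopA fuel (n + 1) 0
            (PySem.Int.bxor (if n % 2 = 0 then (1:Int) else 0) 1)) =
        (if N % 2 = 0 then (1:Int) else 0)
    by_cases hb : c < n
    · rw [if_pos hb]
      exact ih (counter + 1) n (c + 1) (by omega) (by omega) (by omega) (by omega) (by omega)
    · rw [if_neg hb]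
      have hval : PySem.Int.bxor (if n % 2 = 0 then (1:Int) else 0) 1 =
          (if (n + 1) % 2 = 0 then (1:Int) else 0) := by
        rcases Int.emod_two_eq n with h | h
        · have h2 : (n + 1) % 2 = 1 := by omega
          rw [h, h2]; decide
        · have h2 : (n + 1) % 2 = 0 := by omega
          rw [h, h2]; decide
      rw [hval]
      have htr := pvTri_succ n
      exact ih (counter + 1) (n + 1) 0 (by omega) (by omega) (by omega) (by omega) (by omega)

-- B's loop returns the bracket position
theorem pvLoopB_eq (index : Int) (N : Int) (hN0 : 0 ≤ N)
    (hN1 : pvTri N ≤ index) (hN2 : index < pvTri (N + 1)) :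
    ∀ (fuel : Nat) (lo hi : Int), (hi - lo).toNat ≤ fuel →
    0 ≤ lo → lo ≤ hi → pvTri lo ≤ index → index < pvTri (hi + 1) →
    pvLoopB fuel index lo hi = N := by
  intro fuel
  induction fuel with
  | zero =>
    intro lo hi hf h0 hlh h1 h2
    have : lo = hi := by omega
    subst this
    exact pvTri_unique h0 hN0 h1 h2 hN1 hN2
  | succ fuel ih =>
    intro lo hi hf h0 hlh h1 h2
    by_cases hlt : lo < hi
    · show (if lo < hi then
              (if pvTri (PySem.Int.floordiv (lo + hi + 1) 2) ≤ index then
                pvLoopB fuel index (PySem.Int.floordiv (lo + hi + 1) 2) hi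
              else pvLoopB fuel index lo (PySem.Int.floordiv (lo + hi + 1) 2 - 1))
            else lo) = N
      rw [if_pos hlt]
      have hfd := PySem.Int.floordiv_eq_ediv_of_pos
        (a := lo + hi + 1) (by omega : (0:Int) < 2)
      set mid := PySem.Int.floordiv (lo + hi + 1) 2 with hmiddef
      have hmid : lo < mid ∧ mid ≤ hi := by omega
      by_cases hb : pvTri mid ≤ index
      · rw [if_pos hb]
        exact ih mid hi (by omega) (by omega) (by omega) hb h2
      · rw [if_neg hb]
        have h2' : index < pvTri (mid - 1 + 1) := by
          have : mid - 1 + 1 = mid := by omega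
          rw [this]; omega
        exact ih lo (mid - 1) (by omega) h0 (by omega) h1 h2'
    · show (if lo < hi then _ else lo) = N
      rw [if_neg hlt]
      have : lo = hi := by omega
      subst this
      exact pvTri_unique h0 hN0 h1 h2 hN1 hN2

theorem pvParity (N : Int) :
    PySem.Int.bxor 1 (PySem.Int.mod N 2) = (if N % 2 = 0 then (1:Int) else 0) := by
  rw [PySem.Int.mod_eq_emod_of_pos (by omega)]
  rcases Int.emod_two_eq N with h | h <;> rw [h] <;> decide

theorem pvTri_lt_succ_self (m : Int) (h : 0 ≤ m) : m < pvTri (m + 1) := by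
  have := pvTri_two_mul (m + 1)
  nlinarith

-- ===== VERDICT (by name: the statement is the Claim_ definition above) =====
theorem get_inf_seq_element_1_spec : Claim_equal_get_inf_seq_element_1 := by
  intro index _
  unfold Spec_get_inf_seq_element_1 get_inf_seq_element_1 get_inf_seq_element_1_alt
  by_cases hle : index ≤ 0
  · rw [if_pos hle]
    have h0 : index.toNat = 0 := by omega
    rw [h0]
    rfl
  · rw [if_neg hle]
    obtain ⟨N, hN0, hN1, hN2⟩ := pvTri_exists index (by omega)
    have htri0 : pvTri 0 = 0 := by decide
    have hB := pvLoopB_eq index N hN0 hN1 hN2 index.toNat 0 index (by omega)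
      (by omega) (by omega) (by omega)
      (pvTri_lt_succ_self index (by omega))
    have hA := pvLoopA_eq index N hN0 hN1 hN2 index.toNat 0 0 0 (by omega) (by omega)
      (by omega) (by omega) (by omega)
    simp only [show (if (0:Int) % 2 = 0 then (1:Int) else 0) = 1 from by decide] at hA
    rw [hA, hB, pvParity]
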